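-- pv_equiv track=rewrite | github.com/pluzorminuz/pluz-owws | next_ver.py | next_ver
-- ===== SOURCE A (Python) =====
-- def next_ver(input):
-- 	j = input
-- 	j.sort() # sorts normally by alphabetical order
-- 	j.sort(key=len) # sorts by descending length
-- 	i = [file[6:] for file in j][-1].lower()
-- 	k = [ord(s)-97 for s in i]
-- 	k.reverse()
-- 	index = 0
-- 	while(True):
-- 		if index >= len(k):
-- 			k.append(-1)
-- 		k[index] += 1
-- 		if k[index] > 25:
-- 			k[index] %= 26
-- 			index += 1
-- 			continue
-- 		break
-- 	k.reverse()
-- 	return j[0]+''.join([chr(s+97) for s in k])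
-- ===== SOURCE B (Python) =====
-- def next_ver(input):
--     # Same observable in-place sorts as the original; the increment is a direct
--     # right-to-left recursion on the suffix string instead of a reversed digit
--     # list with an index-driven carry loop.
--     input.sort()
--     input.sort(key=len)
--
--     def bump(s):
--         if not s:
--             return 'a'
--         d = ord(s[-1]) - 97
--         if d >= 25:
--             return bump(s[:-1]) + chr((d + 1) % 26 + 97)
--         return s[:-1] + chr(d + 1 + 97)
--
--     return input[0] + bump(input[-1][6:].lower())
-- ===== Notes on version B (the rewrite author's own statement) =====
-- stated objective: simpler
-- what changed: The reversed digit-list with an index-driven append/carry while-loop is replaced by a direct right-to-left recursion on the suffix string that stops at the first non-carrying character, with no digit list, no reversals and no join.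
-- outside the precondition, e.g. on next_ver([]): A raises IndexError, B raises IndexError
import Mathlib
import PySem

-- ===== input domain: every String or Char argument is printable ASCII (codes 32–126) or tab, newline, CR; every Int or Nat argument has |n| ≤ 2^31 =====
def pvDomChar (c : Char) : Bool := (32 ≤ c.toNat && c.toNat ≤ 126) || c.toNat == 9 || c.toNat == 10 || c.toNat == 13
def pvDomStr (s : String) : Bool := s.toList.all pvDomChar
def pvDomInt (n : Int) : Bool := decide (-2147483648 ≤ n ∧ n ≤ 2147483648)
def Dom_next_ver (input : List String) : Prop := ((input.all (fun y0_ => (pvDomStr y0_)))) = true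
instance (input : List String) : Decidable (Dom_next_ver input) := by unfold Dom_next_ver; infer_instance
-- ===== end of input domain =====

-- B replaces A's reversed digit-list and index-driven carry while-loop by a direct
-- right-to-left recursion on the suffix string (objective: simpler). Both A and B sort
-- the input list in place (observable mutation, identical in both); the claim is about
-- the return value.

-- ===== PORT A =====
-- ord(s)-97
def pvDg (c : Char) : Int := (c.toNat : Int) - 97
-- chr(s+97)
def pvCh (d : Int) : Char := Char.ofNat (d + 97).toNat

-- A's while-loop over the reversed digit list, walking `index` forward:
-- past the end it appends -1, adds 1 (giving 0 ≤ 25) and breaks.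
def pvCarry : List Int → List Int
  | [] => [(-1) + 1]
  | d :: rest =>
    let d' := d + 1
    if d' > 25 then PySem.Int.mod d' 26 :: pvCarry rest else d' :: rest

def next_ver (input : List String) : String :=
  let j := PySem.List.sorted (PySem.List.sorted input (fun x => x) false) (fun f => PySem.Str.len f) false
  -- [file[6:] for file in j][-1].lower(); "" only outside Pre_ (IndexError)
  let i := (PySem.List.pyGet? (j.map (fun file => PySem.Str.slice file (some 6) none)) (-1)).getD ""
  let il := (PySem.Str.lower i).toList
  let k := (il.map pvDg).reverse
  let k2 := (pvCarry k).reverse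
  String.ofList (((PySem.List.pyGet? j 0).getD "").toList ++ k2.map pvCh)

-- ===== PORT B =====
-- bump(s): right-to-left recursion on the suffix
def pvBump (s : List Char) : List Char :=
  if hs : s = [] then ['a']
  else
    let d : Int := (((s.getLast hs).toNat : Int) - 97)
    if d ≥ 25 then pvBump s.dropLast ++ [Char.ofNat ((PySem.Int.mod (d + 1) 26).toNat + 97)]
    else s.dropLast ++ [Char.ofNat (d + 1 + 97).toNat]
termination_by s.length
decreasing_by
  cases s with
  | nil => exact absurd rfl hs
  | cons a t => simp [List.length_dropLast]

def next_ver_alt (input : List String) : String :=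
  let j := PySem.List.sorted (PySem.List.sorted input (fun x => x) false) (fun f => PySem.Str.len f) false
  let last := (PySem.List.pyGet? j (-1)).getD ""   -- "" only outside Pre_ (IndexError)
  let suf := (PySem.Str.lower (PySem.Str.slice last (some 6) none)).toList
  String.ofList (((PySem.List.pyGet? j 0).getD "").toList ++ pvBump suf)

-- ===== PRECONDITION & SPEC =====
-- Pre_ excludes only the empty list, on which A raises IndexError at j[-1].
def Pre_next_ver (input : List String) : Prop := input ≠ []
instance (input : List String) : Decidable (Pre_next_ver input) := by unfold Pre_next_ver; infer_instance
def pvWitness_next_ver : List String := (["version01", "x"])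

def Spec_next_ver (input : List String) (out : String) : Prop := out = next_ver_alt input
instance (input : List String) (out : String) : Decidable (Spec_next_ver input out) := by unfold Spec_next_ver; infer_instance

-- ===== CLAIM (what is proved, stated in full; the proofs are below) =====
def Claim_equal_next_ver : Prop := ∀ (input : List String), Dom_next_ver input → Pre_next_ver input → Spec_next_ver input (next_ver input)

-- ===== LEMMAS AND PROOFS =====

lemma pvMod_nonneg (a : Int) : 0 ≤ PySem.Int.mod a 26 := by
  show (0:Int) ≤ Int.fmod a 26
  have h : Int.fmod a 26 = a % 26 + if 0 ≤ (26:Int) ∨ (26:Int) ∣ a then 0 else 26 :=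
    Int.fmod_eq_emod
  have h2 := Int.emod_nonneg a (by decide : (26:Int) ≠ 0)
  rw [h]
  split_ifs <;> omega

-- core: A's carry loop on the reversed digit list equals B's right-to-left recursion
lemma pvCarry_eq_pvBump (s : List Char) :
    (pvCarry ((s.map pvDg).reverse)).reverse.map pvCh = pvBump s := by
  induction s using List.reverseRecOn with
  | nil =>
      rw [pvBump]
      simp [pvCarry, pvCh]
  | append_singleton s' c IH =>
      have hne : s' ++ [c] ≠ [] := by simp
      rw [pvBump]
      rw [dif_neg hne]
      simp only [List.getLast_append_singleton, List.dropLast_concat]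
      simp only [List.map_append, List.reverse_append, List.map_cons, List.map_nil,
        List.reverse_cons, List.reverse_nil, List.nil_append, List.cons_append]
      rw [pvCarry]
      by_cases h : pvDg c + 1 > 25
      · rw [if_pos h]
        rw [if_pos (by simp [pvDg] at h ⊢; omega : ((c.toNat : Int) - 97) ≥ 25)]
        simp only [List.reverse_cons, List.map_append, List.map_cons, List.map_nil, IH]
        congr 1
        have h0 := pvMod_nonneg ((c.toNat : Int) - 97 + 1)
        simp only [pvCh, pvDg, List.cons.injEq, and_true]
        congr 1
        omega
      · rw [if_neg h]
        rw [if_neg (by simp [pvDg] at h ⊢; omega : ¬ ((c.toNat : Int) - 97) ≥ 25)]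
        simp only [List.reverse_cons, List.reverse_reverse, List.map_append, List.map_map,
          List.map_cons, List.map_nil]
        simp [Function.comp_def, pvCh, pvDg]

lemma pv_sorted_ne_nil (input : List String) (h : input ≠ []) :
    PySem.List.sorted (PySem.List.sorted input (fun x => x) false) (fun f => PySem.Str.len f) false ≠ [] := by
  simp [PySem.List.sorted_eq_nil_iff, h]

-- ===== VERDICT (by name: the statement is the Claim_ definition above) =====
theorem next_ver_spec : Claim_equal_next_ver := by
  intro input _ hpre
  unfold Spec_next_ver next_ver next_ver_alt
  have hj := pv_sorted_ne_nil input hpre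
  set j := PySem.List.sorted (PySem.List.sorted input (fun x => x) false) (fun f => PySem.Str.len f) false with hjdef
  have hsel : PySem.List.pyGet? (j.map (fun file => PySem.Str.slice file (some 6) none)) (-1)
      = some (PySem.Str.slice (j.getLast hj) (some 6) none) := by
    rw [PySem.List.pyGet?_neg_one, List.getLast?_map, List.getLast?_eq_some_getLast hj]
    rfl
  have hlast : PySem.List.pyGet? j (-1) = some (j.getLast hj) := by
    rw [PySem.List.pyGet?_neg_one, List.getLast?_eq_some_getLast hj]
  simp only [hsel, hlast, Option.getD_some]
  rw [pvCarry_eq_pvBump]
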